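-- pv_equiv track=rewrite | github.com/linannn/LeetCode_Solution | 932.漂亮数组.py | beautifulArray
-- ===== SOURCE A (Python) =====
-- from typing import List
--
-- def beautifulArray(N: int) -> List[int]:
--     if N == 1:
--         return [1]
--     if N == 2:
--         return [1, 2]
--     if N == 3:
--         return [1, 3, 2]
--     if N == 4:
--         return [1, 3, 2, 4]
--     tmp = [1, 3, 2, 4]
--     while len(tmp) < N:
--         for i in range(len(tmp)):
--             tmp[i] = tmp[i] * 2 - 1
--         tmp.extend([i+1 for i in tmp])
--     return list(filter(lambda i: i <= N, tmp))
-- ===== SOURCE B (Python) =====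
-- from typing import List
--
-- def beautifulArray(N: int) -> List[int]:
--     if N <= 0:
--         return []
--     if N == 1:
--         return [1]
--     odds = beautifulArray((N + 1) // 2)
--     evens = beautifulArray(N // 2)
--     return [2 * x - 1 for x in odds] + [2 * x for x in evens]
-- ===== Notes on version B (the rewrite author's own statement) =====
-- stated objective: simpler
-- what changed: Replaces the bottom-up doubling loop (build an array of power-of-two size by in-place odd/even expansion, then filter out elements > N) with a top-down divide-and-conquer recursion on N itself: odds half from beautifulArray((N+1)//2), evens half from beautifulArray(N//2), so no over-building and no end filter and no hard-coded special cases for N in 2..4.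
import Mathlib
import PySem

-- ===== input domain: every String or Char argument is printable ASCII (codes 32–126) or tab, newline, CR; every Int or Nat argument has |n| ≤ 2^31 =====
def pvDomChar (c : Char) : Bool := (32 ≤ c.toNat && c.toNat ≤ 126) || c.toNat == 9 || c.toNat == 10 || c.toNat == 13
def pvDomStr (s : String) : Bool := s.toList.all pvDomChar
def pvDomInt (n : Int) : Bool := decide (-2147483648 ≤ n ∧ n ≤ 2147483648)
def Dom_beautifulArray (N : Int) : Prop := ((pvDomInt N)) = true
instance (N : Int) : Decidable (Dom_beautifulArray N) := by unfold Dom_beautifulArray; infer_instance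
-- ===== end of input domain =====

-- B replaces A's bottom-up doubling-then-filter loop with a top-down divide-and-conquer
-- recursion on N (odds from (N+1)//2, evens from N//2); same return value, simpler code.

-- ===== PORT A =====
-- one iteration of A's while-body: tmp[i] := tmp[i]*2-1 in place, then extend with [i+1 for i in tmp]
def pvStep (tmp : List Int) : List Int :=
  let t := tmp.map (fun x => x * 2 - 1)
  t ++ t.map (fun x => x + 1)

-- cited by pvLoop's decreasing_by
lemma pvStep_length (t : List Int) : (pvStep t).length = 2 * t.length := by
  simp [pvStep]; omega

-- A's 'while len(tmp) < N' loop (tmp is always nonempty, which makes the doubling terminate)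
def pvLoop (N : Int) (tmp : List Int) (h : 0 < tmp.length) : List Int :=
  if (tmp.length : Int) < N then
    pvLoop N (pvStep tmp) (by rw [pvStep_length]; omega)
  else tmp
termination_by N.toNat - tmp.length
decreasing_by
  rw [pvStep_length]
  omega

def beautifulArray (N : Int) : List Int :=
  if N = 1 then [1]
  else if N = 2 then [1, 2]
  else if N = 3 then [1, 3, 2]
  else if N = 4 then [1, 3, 2, 4]
  else (pvLoop N [1, 3, 2, 4] (by decide)).filter (fun i => i ≤ N)

-- ===== PORT B =====
def beautifulArray_alt (N : Int) : List Int :=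
  if N ≤ 0 then []
  else if N = 1 then [1]
  else
    (beautifulArray_alt (PySem.Int.floordiv (N + 1) 2)).map (fun x => 2 * x - 1) ++
    (beautifulArray_alt (PySem.Int.floordiv N 2)).map (fun x => 2 * x)
termination_by N.toNat
decreasing_by
  · rw [PySem.Int.floordiv_eq_ediv_of_pos (by omega)]; omega
  · rw [PySem.Int.floordiv_eq_ediv_of_pos (by omega)]; omega

-- ===== PRECONDITION & SPEC =====
def Spec_beautifulArray (N : Int) (out : List Int) : Prop := out = beautifulArray_alt N
instance (N : Int) (out : List Int) : Decidable (Spec_beautifulArray N out) := by unfold Spec_beautifulArray; infer_instance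

-- ===== CLAIM (what is proved, stated in full; the proofs are below) =====
def Claim_equal_beautifulArray : Prop := ∀ (N : Int), Dom_beautifulArray N → Spec_beautifulArray N (beautifulArray N)

-- ===== LEMMAS AND PROOFS =====

-- the doubling sequence: A's tmp after k iterations starting from [1]
def pvD (k : Nat) : List Int := pvStep^[k] [1]

lemma pvD_succ (k : Nat) : pvD (k + 1) = pvStep (pvD k) := by
  simp [pvD, Function.iterate_succ_apply']

lemma pvStep_eq (t : List Int) :
    pvStep t = t.map (fun x => x * 2 - 1) ++ (t.map (fun x => x * 2 - 1)).map (fun x => x + 1) := rfl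

lemma pvD_length (k : Nat) : (pvD k).length = 2 ^ k := by
  induction k with
  | zero => rfl
  | succ k ih => simp [pvD_succ, pvStep_eq, ih]; ring

lemma pvLoop_congr (N : Int) {t t' : List Int} (e : t = t') (h : 0 < t.length) :
    pvLoop N t h = pvLoop N t' (e ▸ h) := by cases e; rfl

lemma alt_nonpos {N : Int} (h : N ≤ 0) : beautifulArray_alt N = [] := by
  rw [beautifulArray_alt]; simp [h]

lemma alt1 : beautifulArray_alt 1 = [1] := by rw [beautifulArray_alt]; norm_num

-- B's recursion unfolds the same way at EVERY N (including N ≤ 0 and N = 1)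
lemma alt_unfold (N : Int) :
    beautifulArray_alt N =
      (beautifulArray_alt (PySem.Int.floordiv (N + 1) 2)).map (fun x => 2 * x - 1) ++
      (beautifulArray_alt (PySem.Int.floordiv N 2)).map (fun x => 2 * x) := by
  by_cases h : N ≤ 0
  · rw [alt_nonpos h,
      alt_nonpos (by rw [PySem.Int.floordiv_eq_ediv_of_pos (by omega)]; omega),
      alt_nonpos (by rw [PySem.Int.floordiv_eq_ediv_of_pos (by omega)]; omega)]
    simp
  · by_cases h1 : N = 1
    · subst h1
      rw [show PySem.Int.floordiv (1 + 1) 2 = 1 by decide,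
          show PySem.Int.floordiv 1 2 = 0 by decide, alt1,
          alt_nonpos (by norm_num)]
      norm_num
    · rw [beautifulArray_alt]
      simp [h, h1]

-- filtering the odds half of one doubling step
lemma half_odds (N : Int) (t : List Int) :
    (t.map (fun x => x * 2 - 1)).filter (fun i => i ≤ N) =
      (t.filter (fun i => i ≤ (N + 1) / 2)).map (fun x => 2 * x - 1) := by
  induction t with
  | nil => rfl
  | cons a t ih =>
    simp only [List.map_cons, List.filter_cons]
    rw [show (decide (a * 2 - 1 ≤ N)) = (decide (a ≤ (N + 1) / 2)) from
      decide_eq_decide.mpr (by omega)]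
    split
    · simp only [List.map_cons, ih]
      congr 1
      omega
    · exact ih

-- filtering the evens half of one doubling step
lemma half_evens (N : Int) (t : List Int) :
    ((t.map (fun x => x * 2 - 1)).map (fun x => x + 1)).filter (fun i => i ≤ N) =
      (t.filter (fun i => i ≤ N / 2)).map (fun x => 2 * x) := by
  induction t with
  | nil => rfl
  | cons a t ih =>
    simp only [List.map_cons, List.filter_cons]
    rw [show (decide (a * 2 - 1 + 1 ≤ N)) = (decide (a ≤ N / 2)) from
      decide_eq_decide.mpr (by omega)]
    split
    · simp only [List.map_cons, ih]
      congr 1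
      omega
    · exact ih

-- filtering one doubling step = the two recursive halves of B
lemma filter_step (t : List Int) (N : Int) :
    (pvStep t).filter (fun i => i ≤ N) =
      (t.filter (fun i => i ≤ PySem.Int.floordiv (N + 1) 2)).map (fun x => 2 * x - 1) ++
      (t.filter (fun i => i ≤ PySem.Int.floordiv N 2)).map (fun x => 2 * x) := by
  rw [PySem.Int.floordiv_eq_ediv_of_pos (by omega : (0:Int) < 2),
      PySem.Int.floordiv_eq_ediv_of_pos (by omega : (0:Int) < 2),
      pvStep_eq, List.filter_append, half_odds, half_evens]

-- main invariant: B equals A's k-times-doubled array filtered to ≤ N, whenever N ≤ 2^k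
lemma alt_eq_filter_pvD (k : Nat) : ∀ N : Int, N ≤ 2 ^ k →
    beautifulArray_alt N = (pvD k).filter (fun i => i ≤ N) := by
  induction k with
  | zero =>
    intro N hN
    norm_num at hN
    by_cases h : N ≤ 0
    · rw [alt_nonpos h]
      have : ¬ ((1:Int) ≤ N) := by omega
      simp [pvD, this]
    · have : N = 1 := by omega
      subst this
      rw [alt1]
      simp [pvD]
  | succ k ih =>
    intro N hN
    rw [pvD_succ, filter_step, alt_unfold,
        ih _ (by rw [PySem.Int.floordiv_eq_ediv_of_pos (by omega)]; push_cast [pow_succ] at hN ⊢; omega),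
        ih _ (by rw [PySem.Int.floordiv_eq_ediv_of_pos (by omega)]; push_cast [pow_succ] at hN ⊢; omega)]

-- A's loop, started on the k-times-doubled array, lands on a j-times-further-doubled array of length ≥ N
lemma pvLoop_eq_aux (M : Nat) : ∀ (N : Int) (k : Nat) (h : 0 < (pvD k).length),
    N.toNat ≤ 2 ^ k + M →
    ∃ j : Nat, pvLoop N (pvD k) h = pvD (k + j) ∧ N ≤ ((pvD (k + j)).length : Int) := by
  induction M with
  | zero =>
    intro N k h hM
    rw [pvLoop]
    have hk := pvD_length k
    generalize (2:Nat) ^ k = P at hk hM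
    split
    · rename_i hc; omega
    · exact ⟨0, rfl, by simp only [Nat.add_zero]; omega⟩
  | succ M ih =>
    intro N k h hM
    rw [pvLoop]
    split
    · rename_i hc
      rw [pvLoop_congr N (pvD_succ k).symm]
      have hk := pvD_length k
      have hk1 := pvD_length (k + 1)
      obtain ⟨j, hj1, hj2⟩ := ih N (k + 1) (by omega) (by omega)
      refine ⟨j + 1, ?_, ?_⟩
      · rw [show k + (j + 1) = k + 1 + j by omega]; exact hj1
      · rw [show k + (j + 1) = k + 1 + j by omega]; exact hj2
    · exact ⟨0, rfl, by simp only [Nat.add_zero]; omega⟩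

lemma pvLoop_eq (N : Int) (k : Nat) (h : 0 < (pvD k).length) :
    ∃ j : Nat, pvLoop N (pvD k) h = pvD (k + j) ∧ N ≤ ((pvD (k + j)).length : Int) :=
  pvLoop_eq_aux N.toNat N k h (Nat.le_add_left N.toNat (2 ^ k))

lemma base_is_pvD2 : ([1, 3, 2, 4] : List Int) = pvD 2 := by
  simp [pvD, Function.iterate_succ_apply, pvStep_eq]

lemma loop_filter_eq (N : Int) (h : 0 < (pvD 2).length) :
    (pvLoop N (pvD 2) h).filter (fun i => i ≤ N) = beautifulArray_alt N := by
  obtain ⟨j, hj1, hj2⟩ := pvLoop_eq N 2 h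
  rw [hj1, ← alt_eq_filter_pvD (2 + j) N (by rw [pvD_length] at hj2; exact_mod_cast hj2)]

lemma alt2 : beautifulArray_alt 2 = [1, 2] := by
  rw [alt_unfold, show PySem.Int.floordiv (2 + 1) 2 = 1 by decide,
      show PySem.Int.floordiv 2 2 = 1 by decide, alt1]
  norm_num

lemma alt3 : beautifulArray_alt 3 = [1, 3, 2] := by
  rw [alt_unfold, show PySem.Int.floordiv (3 + 1) 2 = 2 by decide,
      show PySem.Int.floordiv 3 2 = 1 by decide, alt1, alt2]
  norm_num

lemma alt4 : beautifulArray_alt 4 = [1, 3, 2, 4] := by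
  rw [alt_unfold, show PySem.Int.floordiv (4 + 1) 2 = 2 by decide,
      show PySem.Int.floordiv 4 2 = 2 by decide, alt2]
  norm_num

-- ===== VERDICT (by name: the statement is the Claim_ definition above) =====
theorem beautifulArray_spec : Claim_equal_beautifulArray := by
  intro N _
  unfold Spec_beautifulArray beautifulArray
  split
  · rename_i h; subst h; exact alt1.symm
  · split
    · rename_i h; subst h; exact alt2.symm
    · split
      · rename_i h; subst h; exact alt3.symm
      · split
        · rename_i h; subst h; exact alt4.symm
        · rw [pvLoop_congr N base_is_pvD2, loop_filter_eq]
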